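-- pv_equiv track=rewrite | github.com/demchenko-eg/Algorithms | H25/t25_23_e4637.py | bf2
-- ===== SOURCE A (Python) =====
-- def bf2(grid, K):
--     M, N = len(grid), len(grid[0])
--     INF = float('-inf')
--     best = [[INF] * N for _ in range(M)]
--     cnt = [[[0] * (K + 1) for _ in range(N)] for _ in range(M)]
--     best[0][0] = grid[0][0]
--     cnt[0][0][0] = 1
--     for i in range(M):
--         for j in range(N):
--             if i == 0 and j == 0:
--                 continue
--             cs = []
--             if i > 0:
--                 cs.append((best[i-1][j], cnt[i-1][j]))
--             if j > 0:
--                 cs.append((best[i][j-1], cnt[i][j-1]))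
--             max_pred = max(p for p, _ in cs)
--             best[i][j] = max_pred + grid[i][j]
--             for best_p, cnt_p in cs:
--                 offset = max_pred - best_p
--                 for d in range(K + 1):
--                     if cnt_p[d] == 0:
--                         continue
--                     d_new = offset + d
--                     if d_new <= K:
--                         cnt[i][j][d_new] += cnt_p[d]
--     ms = best[M-1][N-1]
--     tp = sum(cnt[M-1][N-1][d] for d in range(K + 1))
--     return ms, tp
-- ===== SOURCE B (Python) =====
-- def bf2(grid, K):
--     M, N = len(grid), len(grid[0])
--
--     def merge(xs, ys):
--         # two-pointer merge of two descending (sum, count) lists, adding counts on ties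
--         out = []
--         i = j = 0
--         nx, ny = len(xs), len(ys)
--         while i < nx and j < ny:
--             a = xs[i]
--             b = ys[j]
--             ak = a[0]
--             bk = b[0]
--             if ak > bk:
--                 out.append(a); i += 1
--             elif ak < bk:
--                 out.append(b); j += 1
--             else:
--                 out.append((ak, a[1] + b[1])); i += 1; j += 1
--         out.extend(xs[i:])
--         out.extend(ys[j:])
--         return out
--
--     row = []
--     for i in range(M):
--         new = []
--         gr = grid[i]
--         for j in range(N):
--             g = gr[j]
--             if i == 0 and j == 0:
--                 cell = [(g, 1)]
--             else:
--                 up = [(s + g, c) for s, c in row[j]] if i > 0 else []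
--                 left = [(s + g, c) for s, c in new[j - 1]] if j > 0 else []
--                 merged = merge(up, left)
--                 cut = merged[0][0] - K
--                 cell = [p for p in merged if p[0] >= cut]
--             new.append(cell)
--         row = new
--     last = row[N - 1]
--     return last[0][0], sum(c for _, c in last)
-- ===== Notes on version B (the rewrite author's own statement) =====
-- stated objective: alternative
-- what changed: Each cell keeps a descending sorted list of (path-sum, count) pairs built by a two-pointer sorted merge of the up/left predecessor lists (shifted by the cell value, equal sums adding counts) and cut off below head - K, replacing A's fixed-length deviation-indexed count arrays filled by offset index arithmetic against a separately computed running max.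
import Mathlib
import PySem

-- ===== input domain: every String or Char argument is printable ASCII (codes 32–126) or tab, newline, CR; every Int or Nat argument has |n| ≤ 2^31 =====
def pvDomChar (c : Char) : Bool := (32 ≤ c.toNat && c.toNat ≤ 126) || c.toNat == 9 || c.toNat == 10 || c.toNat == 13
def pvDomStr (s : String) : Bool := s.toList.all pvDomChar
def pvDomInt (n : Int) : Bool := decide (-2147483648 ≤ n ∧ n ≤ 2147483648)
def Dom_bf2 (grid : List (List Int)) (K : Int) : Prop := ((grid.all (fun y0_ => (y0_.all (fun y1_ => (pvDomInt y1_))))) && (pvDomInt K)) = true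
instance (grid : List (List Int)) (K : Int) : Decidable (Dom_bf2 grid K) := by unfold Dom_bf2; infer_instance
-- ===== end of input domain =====

-- B replaces A's deviation-indexed per-cell count arrays (fixed length K+1, filled by offset
-- index arithmetic) with per-cell descending sorted lists of (path-sum, count) pairs combined
-- by a two-pointer sorted merge (ties add counts) and cut below head - K; return values are
-- proved equal on Pre_ (nonempty rectangular-enough grid, K ≥ 0).

-- ===== PORT A =====
-- Python's 2D tables best/cnt: read/write one cell of a list-of-lists
def pvGet2 {α : Type} (t : List (List α)) (i j : Nat) (d : α) : α := (t.getD i []).getD j d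
def pvSet2 {α : Type} (t : List (List α)) (i j : Nat) (v : α) : List (List α) :=
  t.set i ((t.getD i []).set j v)

-- float('-inf') is modelled as `none`; max over predecessors (`max(p for p, _ in cs)`)
def pvOMax (a b : Option Int) : Option Int :=
  match a, b with
  | none, b => b
  | some x, none => some x
  | some x, some y => some (max x y)

-- the body of A's cell update: max_pred, best[i][j], and the double loop filling cnt[i][j]
-- (c0 is the current table entry cnt[i][j], all zeros when the cell is reached)
def pvCellA (K : Int) (Kn : Nat) (g : Int) (cs : List (Option Int × List Int)) (c0 : List Int) :
    Option Int × List Int :=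
  let mp := (cs.map Prod.fst).foldl pvOMax none
  let c := cs.foldl (fun c pc =>
      let off : Int := match mp, pc.1 with
        | some m, some b => m - b
        | _, _ => 0   -- unreachable under Pre_: predecessor cells are already computed
      (List.range Kn).foldl (fun (c : List Int) (d : Nat) =>
        if pc.2.getD d 0 = 0 then c
        else if off + (d : Int) ≤ K then
          c.set (off + (d : Int)).toNat (c.getD (off + (d : Int)).toNat 0 + pc.2.getD d 0)
        else c) c) c0
  ((match mp with | none => none | some m => some (m + g)), c)

-- one iteration of A's doubly-nested loop body (the 'continue' and the cell update)
def pvStepA (grid : List (List Int)) (K : Int) (Kn : Nat)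
    (st : List (List (Option Int)) × List (List (List Int))) (i j : Nat) :
    List (List (Option Int)) × List (List (List Int)) :=
  if i = 0 ∧ j = 0 then st
  else
    let cs : List (Option Int × List Int) :=
      (if 0 < i then [(pvGet2 st.1 (i-1) j none, pvGet2 st.2 (i-1) j [])] else []) ++
      (if 0 < j then [(pvGet2 st.1 i (j-1) none, pvGet2 st.2 i (j-1) [])] else [])
    let cell := pvCellA K Kn (pvGet2 grid i j 0) cs (pvGet2 st.2 i j [])
    (pvSet2 st.1 i j cell.1, pvSet2 st.2 i j cell.2)

def bf2 (grid : List (List Int)) (K : Int) : Int × Int :=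
  let M := grid.length
  let N := (grid.headD []).length                      -- len(grid[0]); Pre_ excludes grid = []
  let Kn := (K + 1).toNat                              -- length of [0] * (K + 1)
  let best0 := pvSet2 (List.replicate M (List.replicate N (none : Option Int))) 0 0
      (some ((grid.headD []).headD 0))                 -- best[0][0] = grid[0][0]; Pre_ excludes empty first row
  let cnt0 := pvSet2 (List.replicate M (List.replicate N (List.replicate Kn (0 : Int)))) 0 0
      ((List.replicate Kn (0 : Int)).set 0 1)          -- cnt[0][0][0] = 1; raises for K < 0, excluded by Pre_
  let st := (List.range M).foldl (fun st i =>
      (List.range N).foldl (fun st j => pvStepA grid K Kn st i j) st) (best0, cnt0)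
  ((pvGet2 st.1 (M-1) (N-1) none).getD 0,              -- always `some _` under Pre_
   (List.range Kn).foldl (fun s d => s + (pvGet2 st.2 (M-1) (N-1) []).getD d 0) 0)

-- ===== PORT B =====
-- the two-pointer while loop of Source B's merge: descending (sum, count) lists, ties add counts;
-- out.extend(xs[i:]); out.extend(ys[j:]) are the two exhausted-side equations
def pvMerge : List (Int × Int) → List (Int × Int) → List (Int × Int)
  | [], ys => ys
  | a :: xs, [] => a :: xs
  | a :: xs, b :: ys =>
    if b.1 < a.1 then a :: pvMerge xs (b :: ys)
    else if a.1 < b.1 then b :: pvMerge (a :: xs) ys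
    else (a.1, a.2 + b.2) :: pvMerge xs ys
termination_by xs ys => xs.length + ys.length

-- [(s + g, c) for s, c in pairs]
def pvShift (l : List (Int × Int)) (g : Int) : List (Int × Int) := l.map (fun p => (p.1 + g, p.2))

-- the body computing one cell of the current row
def pvCellBStep (K : Int) (prev curRow : List (List (Int × Int))) (ir : Int × List Int)
    (j : Nat) : List (Int × Int) :=
  let g := ir.2.getD j 0
  if ir.1 = 0 ∧ j = 0 then [(g, 1)]
  else
    let up := if 0 < ir.1 then pvShift (prev.getD j []) g else []
    let left := if 0 < j then pvShift (curRow.getD (j - 1) []) g else []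
    let merged := pvMerge up left
    let top := (merged.headD (0, 0)).1                 -- merged[0][0]; nonempty under Pre_
    merged.filter (fun p => decide (top - K ≤ p.1))

-- 'for j in range(N): new.append(...)'
def pvRowB (K : Int) (N : Nat) (prev : List (List (Int × Int))) (ir : Int × List Int) :
    List (List (Int × Int)) :=
  (List.range N).foldl (fun curRow j => curRow ++ [pvCellBStep K prev curRow ir j]) []

def bf2_alt (grid : List (List Int)) (K : Int) : Int × Int :=
  let N := (grid.headD []).length
  let row := (PySem.List.enumerate grid).foldl (pvRowB K N) []
  let last := row.getD (N - 1) []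
  ((last.headD (0, 0)).1, (last.map Prod.snd).sum)

-- ===== PRECONDITION & SPEC =====
-- Pre_ = exactly where A returns: nonempty grid, nonempty first row, every row at least as
-- long as row 0 (A only reads the first len(grid[0]) entries), and K ≥ 0 (A raises IndexError
-- on K < 0 at cnt[0][0][0]).
def Pre_bf2 (grid : List (List Int)) (K : Int) : Prop :=
  grid ≠ [] ∧ grid.headD [] ≠ [] ∧ (∀ row ∈ grid, (grid.headD []).length ≤ row.length) ∧ 0 ≤ K
instance (grid : List (List Int)) (K : Int) : Decidable (Pre_bf2 grid K) := by
  unfold Pre_bf2; infer_instance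
def pvWitness_bf2 : List (List Int) × Int := ([[1, -2], [3, 4]], 1)

def Spec_bf2 (grid : List (List Int)) (K : Int) (out : Int × Int) : Prop := out = bf2_alt grid K
instance (grid : List (List Int)) (K : Int) (out : Int × Int) : Decidable (Spec_bf2 grid K out) := by
  unfold Spec_bf2; infer_instance

-- ===== CLAIM (what is proved, stated in full; the proofs are below) =====
def Claim_equal_bf2 : Prop := ∀ (grid : List (List Int)) (K : Int),
  Dom_bf2 grid K → Pre_bf2 grid K → Spec_bf2 grid K (bf2 grid K)

-- ===== LEMMAS AND PROOFS =====

-- ================= proof-side definitions =================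

-- A-side cell values (best entry, cnt entry) and the default read off the tables
abbrev CellA : Type := Option Int × List Int
abbrev RepL : Type := List (Int × Int)

def dfltA : CellA := (none, [])

-- the (0,0) cell of A
def cellA0 (Kn : Nat) (g : Int) : CellA := (some g, (List.replicate Kn (0 : Int)).set 0 1)

-- total count stored under key k in a (sum, count) list
def lkL (l : RepL) (k : Int) : Int := ((l.filter (fun p => decide (p.1 = k))).map Prod.snd).sum

-- strictly descending keys
def DescL (l : RepL) : Prop := l.Pairwise (fun a b => b.1 < a.1)

-- B's cell computation over explicit (possibly empty) up/left predecessor lists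
def cellB (K g : Int) (up left : RepL) : RepL :=
  let merged := pvMerge (pvShift up g) (pvShift left g)
  let top := (merged.headD (0, 0)).1
  merged.filter (fun p => decide (top - K ≤ p.1))

-- row-recursive reformulations of the two traversals
def cellsA (K : Int) (Kn : Nat) (up? : Option (List CellA)) (vals : List Int) : Nat → List CellA
  | 0 => []
  | j + 1 =>
    let acc := cellsA K Kn up? vals j
    acc ++ [if up?.isNone ∧ j = 0 then cellA0 Kn (vals.getD 0 0)
            else pvCellA K Kn (vals.getD j 0)
              ((match up? with | some up => [up.getD j dfltA] | none => []) ++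
               (if 0 < j then [acc.getD (j - 1) dfltA] else []))
              (List.replicate Kn (0 : Int))]

def rowsA (K : Int) (Kn N : Nat) : Option (List CellA) → List (List Int) → List (List CellA)
  | _, [] => []
  | up?, vals :: rest =>
    let r := cellsA K Kn up? vals N
    r :: rowsA K Kn N (some r) rest

def cellsB (K : Int) (up? : Option (List RepL)) (vals : List Int) : Nat → List RepL
  | 0 => []
  | j + 1 =>
    let acc := cellsB K up? vals j
    acc ++ [if up?.isNone ∧ j = 0 then [(vals.getD 0 0, 1)]
            else cellB K (vals.getD j 0)
              (match up? with | some up => up.getD j [] | none => [])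
              (if 0 < j then acc.getD (j - 1) [] else [])]

def rowsB (K : Int) (N : Nat) : Option (List RepL) → List (List Int) → List (List RepL)
  | _, [] => []
  | up?, vals :: rest =>
    let r := cellsB K up? vals N
    r :: rowsB K N (some r) rest

-- the invariant tying an A-cell to a B-list: the list holds exactly the nonzero counts,
-- keyed by absolute sum m - deviation, in strictly descending key order
def InvCell (K : Int) (Kn : Nat) (cell : CellA) (l : RepL) : Prop :=
  ∃ m c, cell = (some m, c) ∧
    c.length = Kn ∧
    (∀ e : Nat, e < Kn → c.getD e 0 = lkL l (m - e)) ∧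
    (∀ p ∈ l, m - K ≤ p.1 ∧ p.1 ≤ m ∧ 0 < p.2) ∧
    DescL l ∧
    (∃ cm, (m, cm) ∈ l)

def InvRow (K : Int) (Kn : Nat) (ra : List CellA) (rb : List RepL) : Prop :=
  ra.length = rb.length ∧
  ∀ j, j < ra.length → InvCell K Kn (ra.getD j dfltA) (rb.getD j [])

-- ================= lookup / merge / shift / filter lemmas =================

theorem lkL_nil (k : Int) : lkL [] k = 0 := rfl

theorem lkL_cons (p : Int × Int) (t : RepL) (k : Int) :
    lkL (p :: t) k = (if p.1 = k then p.2 else 0) + lkL t k := by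
  by_cases h : p.1 = k <;> simp [lkL, h]

theorem lkL_nonneg (l : RepL) (hpos : ∀ p ∈ l, 0 < p.2) (k : Int) : 0 ≤ lkL l k := by
  induction l with
  | nil => simp [lkL_nil]
  | cons a t ih =>
    rw [lkL_cons]
    have h1 := hpos a (List.mem_cons_self ..)
    have h2 := ih (fun p hp => hpos p (List.mem_cons_of_mem _ hp))
    split <;> omega

theorem lkL_eq_zero_of_not_mem (l : RepL) (k : Int) (h : ∀ p ∈ l, p.1 ≠ k) : lkL l k = 0 := by
  induction l with
  | nil => rfl
  | cons a t ih =>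
    rw [lkL_cons, if_neg (h a (List.mem_cons_self ..)), zero_add]
    exact ih (fun p hp => h p (List.mem_cons_of_mem _ hp))

theorem lkL_eq_zero_of_gt (l : RepL) (m : Int) (h : ∀ p ∈ l, p.1 ≤ m) (k : Int) (hk : m < k) :
    lkL l k = 0 :=
  lkL_eq_zero_of_not_mem l k (fun p hp => by have := h p hp; omega)

theorem lkL_of_mem_desc (l : RepL) (hd : DescL l) (k v : Int) (hm : (k, v) ∈ l) : lkL l k = v := by
  induction l with
  | nil => cases hm
  | cons a t ih =>
    have hlt : ∀ p ∈ t, p.1 < a.1 := fun p hp => (List.pairwise_cons.mp hd).1 p hp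
    rw [lkL_cons]
    rcases List.mem_cons.mp hm with h | h
    · have h1 : a.1 = k := by rw [← h]
      have h2 : a.2 = v := by rw [← h]
      rw [if_pos h1, lkL_eq_zero_of_not_mem t k (fun p hp => by have := hlt p hp; omega),
        h2, add_zero]
    · have hak : a.1 ≠ k := by have := hlt (k, v) h; omega
      rw [if_neg hak, zero_add]
      exact ih (List.pairwise_cons.mp hd).2 h

theorem lkL_ne_zero_mem (l : RepL) (k : Int) (h : lkL l k ≠ 0) : ∃ v, (k, v) ∈ l := by
  by_contra hc
  push_neg at hc
  exact h (lkL_eq_zero_of_not_mem l k (fun p hp hpk => hc p.2 (by rw [← hpk]; exact hp)))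

theorem lkL_shift (l : RepL) (g k : Int) : lkL (pvShift l g) k = lkL l (k - g) := by
  induction l with
  | nil => rfl
  | cons a t ih =>
    rw [pvShift, List.map_cons, lkL_cons, ← pvShift, ih, lkL_cons]
    by_cases h : a.1 + g = k
    · rw [if_pos h, if_pos (by omega)]
    · rw [if_neg h, if_neg (by omega)]

theorem shift_pos (l : RepL) (g : Int) (h : ∀ p ∈ l, 0 < p.2) : ∀ p ∈ pvShift l g, 0 < p.2 := by
  intro p hp
  rcases List.mem_map.mp hp with ⟨q, hq, rfl⟩
  exact h q hq

theorem shift_desc (l : RepL) (g : Int) (h : DescL l) : DescL (pvShift l g) := by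
  rw [pvShift, DescL, List.pairwise_map]
  exact h.imp (fun hab => by omega)

theorem pvMerge_nil_right (xs : RepL) : pvMerge xs [] = xs := by
  cases xs <;> rw [pvMerge]

theorem lkL_merge (xs ys : RepL) (k : Int) : lkL (pvMerge xs ys) k = lkL xs k + lkL ys k := by
  induction xs, ys using pvMerge.induct with
  | case1 ys => simp [pvMerge, lkL_nil]
  | case2 a xs => simp [pvMerge, lkL_nil]
  | case3 a xs b ys h ih =>
    rw [pvMerge, if_pos h, lkL_cons, ih, lkL_cons, lkL_cons]; ring
  | case4 a xs b ys h h2 ih =>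
    rw [pvMerge, if_neg h, if_pos h2, lkL_cons, ih, lkL_cons, lkL_cons]; ring
  | case5 a xs b ys h h2 ih =>
    rw [pvMerge, if_neg h, if_neg h2, lkL_cons, ih, lkL_cons, lkL_cons]
    have hab : a.1 = b.1 := by omega
    by_cases hk : a.1 = k
    · rw [if_pos hk, if_pos hk, if_pos (by omega)]; ring
    · rw [if_neg hk, if_neg hk, if_neg (by omega)]; ring

theorem merge_key_mem (xs ys : RepL) :
    ∀ p ∈ pvMerge xs ys, (∃ q ∈ xs, q.1 = p.1) ∨ (∃ q ∈ ys, q.1 = p.1) := by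
  induction xs, ys using pvMerge.induct with
  | case1 ys =>
    intro p hp
    exact Or.inr ⟨p, by simpa [pvMerge] using hp, rfl⟩
  | case2 a xs =>
    intro p hp
    exact Or.inl ⟨p, by simpa [pvMerge] using hp, rfl⟩
  | case3 a xs b ys h ih =>
    intro p hp
    rw [pvMerge, if_pos h] at hp
    rcases List.mem_cons.mp hp with h2 | h2
    · exact Or.inl ⟨a, List.mem_cons_self .., by rw [h2]⟩
    · rcases ih p h2 with ⟨q, hq, hqe⟩ | hr
      · exact Or.inl ⟨q, List.mem_cons_of_mem _ hq, hqe⟩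
      · exact Or.inr hr
  | case4 a xs b ys h h2 ih =>
    intro p hp
    rw [pvMerge, if_neg h, if_pos h2] at hp
    rcases List.mem_cons.mp hp with h3 | h3
    · exact Or.inr ⟨b, List.mem_cons_self .., by rw [h3]⟩
    · rcases ih p h3 with hl | ⟨q, hq, hqe⟩
      · exact Or.inl hl
      · exact Or.inr ⟨q, List.mem_cons_of_mem _ hq, hqe⟩
  | case5 a xs b ys h h2 ih =>
    intro p hp
    rw [pvMerge, if_neg h, if_neg h2] at hp
    rcases List.mem_cons.mp hp with h3 | h3
    · exact Or.inl ⟨a, List.mem_cons_self .., by rw [h3]⟩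
    · rcases ih p h3 with ⟨q, hq, hqe⟩ | ⟨q, hq, hqe⟩
      · exact Or.inl ⟨q, List.mem_cons_of_mem _ hq, hqe⟩
      · exact Or.inr ⟨q, List.mem_cons_of_mem _ hq, hqe⟩

theorem merge_pos (xs ys : RepL) (hx : ∀ p ∈ xs, 0 < p.2) (hy : ∀ p ∈ ys, 0 < p.2) :
    ∀ p ∈ pvMerge xs ys, 0 < p.2 := by
  induction xs, ys using pvMerge.induct with
  | case1 ys =>
    intro p hp
    exact hy p (by simpa [pvMerge] using hp)
  | case2 a xs =>
    intro p hp
    exact hx p (by simpa [pvMerge] using hp)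
  | case3 a xs b ys h ih =>
    intro p hp
    rw [pvMerge, if_pos h] at hp
    rcases List.mem_cons.mp hp with h2 | h2
    · rw [h2]; exact hx a (List.mem_cons_self ..)
    · exact ih (fun q hq => hx q (List.mem_cons_of_mem _ hq)) hy p h2
  | case4 a xs b ys h h2 ih =>
    intro p hp
    rw [pvMerge, if_neg h, if_pos h2] at hp
    rcases List.mem_cons.mp hp with h3 | h3
    · rw [h3]; exact hy b (List.mem_cons_self ..)
    · exact ih hx (fun q hq => hy q (List.mem_cons_of_mem _ hq)) p h3
  | case5 a xs b ys h h2 ih =>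
    intro p hp
    rw [pvMerge, if_neg h, if_neg h2] at hp
    rcases List.mem_cons.mp hp with h3 | h3
    · have ha := hx a (List.mem_cons_self ..)
      have hb := hy b (List.mem_cons_self ..)
      rw [h3]; simp only []; omega
    · exact ih (fun q hq => hx q (List.mem_cons_of_mem _ hq))
        (fun q hq => hy q (List.mem_cons_of_mem _ hq)) p h3

theorem merge_desc (xs ys : RepL) (hx : DescL xs) (hy : DescL ys) : DescL (pvMerge xs ys) := by
  induction xs, ys using pvMerge.induct with
  | case1 ys => simpa [pvMerge] using hy
  | case2 a xs => simpa [pvMerge] using hx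
  | case3 a xs b ys h ih =>
    rw [pvMerge, if_pos h]
    refine List.pairwise_cons.mpr ⟨?_, ih (List.pairwise_cons.mp hx).2 hy⟩
    intro p hp
    rcases merge_key_mem _ _ p hp with ⟨q, hq, hqe⟩ | ⟨q, hq, hqe⟩
    · have := (List.pairwise_cons.mp hx).1 q hq; omega
    · rcases List.mem_cons.mp hq with h2 | h2
      · rw [← hqe, h2]; omega
      · have := (List.pairwise_cons.mp hy).1 q h2; omega
  | case4 a xs b ys h h2 ih =>
    rw [pvMerge, if_neg h, if_pos h2]
    refine List.pairwise_cons.mpr ⟨?_, ih hx (List.pairwise_cons.mp hy).2⟩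
    intro p hp
    rcases merge_key_mem _ _ p hp with ⟨q, hq, hqe⟩ | ⟨q, hq, hqe⟩
    · rcases List.mem_cons.mp hq with h3 | h3
      · rw [← hqe, h3]; omega
      · have := (List.pairwise_cons.mp hx).1 q h3; omega
    · have := (List.pairwise_cons.mp hy).1 q hq; omega
  | case5 a xs b ys h h2 ih =>
    rw [pvMerge, if_neg h, if_neg h2]
    refine List.pairwise_cons.mpr
      ⟨?_, ih (List.pairwise_cons.mp hx).2 (List.pairwise_cons.mp hy).2⟩
    intro p hp
    rcases merge_key_mem _ _ p hp with ⟨q, hq, hqe⟩ | ⟨q, hq, hqe⟩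
    · have := (List.pairwise_cons.mp hx).1 q hq; simp only []; omega
    · have := (List.pairwise_cons.mp hy).1 q hq; simp only []; omega

theorem head_eq_of_max (l : RepL) (hd : DescL l) (m : Int) (hmem : ∃ cm, (m, cm) ∈ l)
    (hub : ∀ p ∈ l, p.1 ≤ m) : (l.headD (0, 0)).1 = m := by
  obtain ⟨cm, hm⟩ := hmem
  cases l with
  | nil => cases hm
  | cons a t =>
    rcases List.mem_cons.mp hm with h | h
    · rw [List.headD_cons, ← h]
    · have h1 : m < a.1 := (List.pairwise_cons.mp hd).1 (m, cm) h
      have h2 := hub a (List.mem_cons_self ..)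
      rw [List.headD_cons]
      omega

theorem lkL_filter (q : Int → Bool) (l : RepL) (k : Int) :
    lkL (l.filter (fun p => q p.1)) k = if q k then lkL l k else 0 := by
  induction l with
  | nil => rw [List.filter_nil]; split <;> rfl
  | cons a t ih =>
    rw [List.filter_cons]
    by_cases hq : q a.1 = true
    · rw [if_pos hq, lkL_cons, ih, lkL_cons]
      by_cases hk : a.1 = k
      · rw [if_pos hk]
        simp [hk ▸ hq]
      · rw [if_neg hk]
        split <;> simp
    · rw [if_neg hq, ih, lkL_cons]
      by_cases hk : a.1 = k
      · simp [hk ▸ hq]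
      · rw [if_neg hk]
        split <;> simp

theorem desc_keys_nodup (l : RepL) (h : DescL l) : (l.map Prod.fst).Nodup := by
  rw [List.Nodup, List.pairwise_map]
  exact h.imp (fun hab => by omega)

-- with strictly descending keys, looking up every key in order recovers the counts
theorem map_keys_lk (l : RepL) (h : DescL l) :
    (l.map Prod.fst).map (fun k => lkL l k) = l.map Prod.snd := by
  induction l with
  | nil => rfl
  | cons a t ih =>
    have hlt : ∀ p ∈ t, p.1 < a.1 := fun p hp => (List.pairwise_cons.mp h).1 p hp
    rw [List.map_cons, List.map_cons, List.map_cons]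
    have h1 : lkL (a :: t) a.1 = a.2 := lkL_of_mem_desc _ h a.1 a.2 (List.mem_cons_self ..)
    have h2 : (t.map Prod.fst).map (fun k => lkL (a :: t) k)
        = (t.map Prod.fst).map (fun k => lkL t k) := by
      refine List.map_congr_left ?_
      intro k hk
      rcases List.mem_map.mp hk with ⟨p, hp, rfl⟩
      rw [lkL_cons, if_neg (by have := hlt p hp; omega), zero_add]
    rw [h1, h2, ih (List.pairwise_cons.mp h).2]

-- ================= A's cell computation, characterised =================

theorem getD_set_eq_of_lt (l : List Int) (i : Nat) (v d : Int) (h : i < l.length) :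
    (l.set i v).getD i d = v := by
  rw [List.getD_eq_getElem?_getD, List.getElem?_set_self (by simpa using h)]; rfl

theorem getD_set_ne (l : List Int) (i j : Nat) (v d : Int) (h : i ≠ j) :
    (l.set i v).getD j d = l.getD j d := by
  rw [List.getD_eq_getElem?_getD, List.getElem?_set_ne h, ← List.getD_eq_getElem?_getD]

def pvOff (mp : Int) (pc : CellA) : Int := match pc.1 with | some b => mp - b | none => 0

def contribA (mp : Int) (e : Nat) (pc : CellA) : Int :=
  if pvOff mp pc ≤ (e : Int) then pc.2.getD (e - (pvOff mp pc).toNat) 0 else 0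

theorem innerA_length (K : Int) (Kn : Nat) (off : Int) (cp : List Int) :
    ∀ n : Nat, ∀ c : List Int,
      (((List.range n).foldl (fun (c : List Int) (d : Nat) =>
          if cp.getD d 0 = 0 then c
          else if off + (d : Int) ≤ K then
            c.set (off + (d : Int)).toNat (c.getD (off + (d : Int)).toNat 0 + cp.getD d 0)
          else c) c).length) = c.length := by
  intro n
  induction n with
  | zero => intro c; simp
  | succ n ih =>
    intro c
    rw [List.range_succ, List.foldl_append, List.foldl_cons, List.foldl_nil]
    split
    · exact ih c
    · split
      · rw [List.length_set]; exact ih c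
      · exact ih c


-- the inner 'for d in range(K+1)' loop of A
theorem innerA_getD (K : Int) (Kn : Nat) (hKn : (Kn : Int) = K + 1) (off : Int) (hoff : 0 ≤ off)
    (cp : List Int) (e : Nat) (he : e < Kn) :
    ∀ n : Nat, ∀ c : List Int, c.length = Kn →
      (((List.range n).foldl (fun (c : List Int) (d : Nat) =>
          if cp.getD d 0 = 0 then c
          else if off + (d : Int) ≤ K then
            c.set (off + (d : Int)).toNat (c.getD (off + (d : Int)).toNat 0 + cp.getD d 0)
          else c) c).getD e 0)
        = c.getD e 0 + (if off ≤ (e : Int) ∧ (e : Int) < off + n then cp.getD (e - off.toNat) 0 else 0) := by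
  intro n
  induction n with
  | zero =>
    intro c _
    rw [if_neg (by omega)]
    simp
  | succ n ih =>
    intro c hc
    rw [List.range_succ, List.foldl_append, List.foldl_cons, List.foldl_nil]
    have hlen : (((List.range n).foldl (fun (c : List Int) (d : Nat) =>
        if cp.getD d 0 = 0 then c
        else if off + (d : Int) ≤ K then
          c.set (off + (d : Int)).toNat (c.getD (off + (d : Int)).toNat 0 + cp.getD d 0)
        else c) c).length) = Kn := by rw [innerA_length K Kn off cp n c, hc]
    have ihc := ih c hc
    by_cases hz : cp.getD n 0 = 0
    · rw [if_pos hz, ihc]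
      by_cases hwin : off ≤ (e : Int) ∧ (e : Int) < off + n
      · rw [if_pos hwin, if_pos ⟨hwin.1, by omega⟩]
      · by_cases heq : (e : Int) = off + n
        · rw [if_neg hwin, if_pos (by omega)]
          have hne : e - off.toNat = n := by omega
          rw [hne, hz]
        · rw [if_neg hwin, if_neg (by omega)]
    · rw [if_neg hz]
      by_cases hK' : off + (n : Int) ≤ K
      · rw [if_pos hK']
        by_cases heq : (e : Int) = off + n
        · have htn : (off + (n : Int)).toNat = e := by omega
          rw [htn, getD_set_eq_of_lt _ _ _ _ (by omega), ihc, if_neg (by omega),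
            if_pos (by omega), show e - off.toNat = n by omega]
          ring
        · rw [getD_set_ne _ _ _ _ _ (by omega), ihc]
          by_cases hwin : off ≤ (e : Int) ∧ (e : Int) < off + n
          · rw [if_pos hwin, if_pos ⟨hwin.1, by omega⟩]
          · rw [if_neg hwin, if_neg (by omega)]
      · rw [if_neg hK', ihc]
        by_cases hwin : off ≤ (e : Int) ∧ (e : Int) < off + n
        · rw [if_pos hwin, if_pos ⟨hwin.1, by omega⟩]
        · rw [if_neg hwin, if_neg (by omega)]

-- the whole per-cell count loop of A
theorem cellA_fst (K : Int) (Kn : Nat) (g : Int) (cs : List CellA) (c0 : List Int) (mp : Int)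
    (hmp : (cs.map Prod.fst).foldl pvOMax none = some mp) :
    (pvCellA K Kn g cs c0).1 = some (mp + g) := by
  simp only [pvCellA, hmp]

theorem cellA_cnt_go (K : Int) (hK : 0 ≤ K) (Kn : Nat) (hKn : (Kn : Int) = K + 1)
    (mp : Int) (e : Nat) (he : e < Kn) :
    ∀ (cs : List CellA), (∀ pc ∈ cs, ∃ b, pc.1 = some b ∧ b ≤ mp) →
    ∀ (c : List Int), c.length = Kn →
      ((cs.foldl (fun c pc =>
        (List.range Kn).foldl (fun (c : List Int) (d : Nat) =>
          if pc.2.getD d 0 = 0 then c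
          else if (match (some mp : Option Int), pc.1 with
              | some m, some b => m - b
              | _, _ => 0) + (d : Int) ≤ K then
            c.set ((match (some mp : Option Int), pc.1 with
              | some m, some b => m - b
              | _, _ => 0) + (d : Int)).toNat
              (c.getD ((match (some mp : Option Int), pc.1 with
                | some m, some b => m - b
                | _, _ => 0) + (d : Int)).toNat 0 + pc.2.getD d 0)
          else c) c) c).length = Kn) ∧
      ((cs.foldl (fun c pc =>
        (List.range Kn).foldl (fun (c : List Int) (d : Nat) =>
          if pc.2.getD d 0 = 0 then c
          else if (match (some mp : Option Int), pc.1 with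
              | some m, some b => m - b
              | _, _ => 0) + (d : Int) ≤ K then
            c.set ((match (some mp : Option Int), pc.1 with
              | some m, some b => m - b
              | _, _ => 0) + (d : Int)).toNat
              (c.getD ((match (some mp : Option Int), pc.1 with
                | some m, some b => m - b
                | _, _ => 0) + (d : Int)).toNat 0 + pc.2.getD d 0)
          else c) c) c).getD e 0 = c.getD e 0 + (cs.map (contribA mp e)).sum) := by
  intro cs
  induction cs with
  | nil =>
    intro _ c hc
    refine ⟨by simpa using hc, ?_⟩
    simp only [List.foldl_nil, List.map_nil, List.sum_nil, add_zero]
  | cons pc tl ih =>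
    intro hcs c hc
    obtain ⟨b, hb, hble⟩ := hcs pc (List.mem_cons_self ..)
    simp only [List.foldl_cons, hb]
    have hlen1 : ((List.range Kn).foldl (fun (c : List Int) (d : Nat) =>
        if pc.2.getD d 0 = 0 then c
        else if (mp - b) + (d : Int) ≤ K then
          c.set ((mp - b) + (d : Int)).toNat (c.getD ((mp - b) + (d : Int)).toNat 0 + pc.2.getD d 0)
        else c) c).length = Kn := by
      rw [innerA_length K Kn (mp - b) pc.2 Kn c, hc]
    obtain ⟨ihl, ihg⟩ := ih (fun q hq => hcs q (List.mem_cons_of_mem _ hq)) _ hlen1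
    refine ⟨ihl, ?_⟩
    rw [ihg, innerA_getD K Kn hKn (mp - b) (by omega) pc.2 e he Kn c hc]
    have hcontrib : (if (mp - b) ≤ (e : Int) ∧ (e : Int) < (mp - b) + Kn
        then pc.2.getD (e - (mp - b).toNat) 0 else 0) = contribA mp e pc := by
      rw [contribA, pvOff, hb]
      by_cases hle : (mp - b) ≤ (e : Int)
      · rw [if_pos ⟨hle, by omega⟩, if_pos hle]
      · rw [if_neg (by omega), if_neg hle]
    rw [hcontrib]
    simp only [List.map_cons, List.sum_cons]
    ring

theorem cellA_cnt (K : Int) (hK : 0 ≤ K) (Kn : Nat) (hKn : (Kn : Int) = K + 1)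
    (g mp : Int) (cs : List CellA)
    (hcs : ∀ pc ∈ cs, ∃ b, pc.1 = some b ∧ b ≤ mp)
    (hmp : (cs.map Prod.fst).foldl pvOMax none = some mp)
    (e : Nat) (he : e < Kn) :
    (pvCellA K Kn g cs (List.replicate Kn (0 : Int))).2.length = Kn ∧
    (pvCellA K Kn g cs (List.replicate Kn (0 : Int))).2.getD e 0
      = (cs.map (contribA mp e)).sum := by
  have h := cellA_cnt_go K hK Kn hKn mp e he cs hcs (List.replicate Kn (0 : Int)) (by simp)
  have hrepl : (List.replicate Kn (0 : Int)).getD e 0 = 0 := by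
    rw [List.getD_eq_getElem?_getD, List.getElem?_replicate]
    split <;> rfl
  constructor
  · have := h.1
    simp only [pvCellA, hmp]
    exact this
  · have h2 := h.2
    rw [hrepl, zero_add] at h2
    simp only [pvCellA, hmp]
    exact h2

-- max over the predecessors
theorem foldl_oMax_go (l : List (Option Int)) (hl : ∀ x ∈ l, ∃ c : Int, x = some c) :
    ∀ a : Int, ∃ mp, l.foldl pvOMax (some a) = some mp ∧ a ≤ mp ∧
      (∀ x ∈ l, ∀ b : Int, x = some b → b ≤ mp) ∧ (mp = a ∨ some mp ∈ l) := by
  induction l with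
  | nil => intro a; exact ⟨a, rfl, le_refl a, by simp, Or.inl rfl⟩
  | cons x t ih =>
    intro a
    obtain ⟨c, rfl⟩ := hl x (List.mem_cons_self ..)
    obtain ⟨mp, h1, h2, h3, h4⟩ := ih (fun y hy => hl y (List.mem_cons_of_mem _ hy)) (max a c)
    refine ⟨mp, by simpa [pvOMax] using h1, le_trans (le_max_left a c) h2, ?_, ?_⟩
    · intro y hy b hb
      rcases List.mem_cons.mp hy with h | h
      · have hbc : b = c := by rw [h] at hb; exact (Option.some_inj.mp hb).symm
        exact hbc ▸ le_trans (le_max_right a c) h2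
      · exact h3 y h b hb
    · rcases h4 with h | h
      · rcases le_total a c with hac | hac
        · right; rw [h, max_eq_right hac]; exact List.mem_cons_self ..
        · left; rw [h, max_eq_left hac]
      · exact Or.inr (List.mem_cons_of_mem _ h)

theorem foldl_oMax_spec (cs : List CellA) (hne : cs ≠ [])
    (hcs : ∀ pc ∈ cs, ∃ b : Int, pc.1 = some b) :
    ∃ mp, (cs.map Prod.fst).foldl pvOMax none = some mp ∧
      (∀ pc ∈ cs, ∀ b, pc.1 = some b → b ≤ mp) ∧
      (∃ pc ∈ cs, pc.1 = some mp) := by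
  cases cs with
  | nil => exact absurd rfl hne
  | cons hd tl =>
    obtain ⟨b, hb⟩ := hcs hd (List.mem_cons_self ..)
    have hall : ∀ x ∈ tl.map Prod.fst, ∃ c : Int, x = some c := by
      intro x hx
      rcases List.mem_map.mp hx with ⟨pc, hpc, rfl⟩
      exact hcs pc (List.mem_cons_of_mem _ hpc)
    obtain ⟨mp, h1, h2, h3, h4⟩ := foldl_oMax_go _ hall b
    refine ⟨mp, ?_, ?_, ?_⟩
    · simp only [List.map_cons, List.foldl_cons, hb]
      simpa [pvOMax] using h1
    · intro pc hpc b' hb'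
      rcases List.mem_cons.mp hpc with h | h
      · rw [h, hb] at hb'
        exact (Option.some_inj.mp hb') ▸ h2
      · exact h3 pc.1 (List.mem_map_of_mem h) b' hb'
    · rcases h4 with h | h
      · exact ⟨hd, List.mem_cons_self .., by rw [hb, h]⟩
      · rcases List.mem_map.mp h with ⟨pc, hpc, hpc1⟩
        exact ⟨pc, List.mem_cons_of_mem _ hpc, hpc1⟩

-- ================= the cell correspondence =================

theorem cell_inv (K : Int) (hK : 0 ≤ K) (Kn : Nat) (hKn : (Kn : Int) = K + 1) (g : Int)
    (up? left? : Option (CellA × RepL))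
    (hne : ¬(up? = none ∧ left? = none))
    (hinv : ∀ p ∈ up?.toList ++ left?.toList, InvCell K Kn p.1 p.2) :
    InvCell K Kn
      (pvCellA K Kn g ((up?.toList ++ left?.toList).map Prod.fst) (List.replicate Kn (0 : Int)))
      (cellB K g ((up?.map Prod.snd).getD []) ((left?.map Prod.snd).getD [])) := by
  have hKn1 : 0 < Kn := by omega
  set ps := up?.toList ++ left?.toList with hps
  have hpsne : ps ≠ [] := by
    cases up? <;> cases left? <;> simp_all [hps]
  -- A side: the predecessor maximum
  have hall : ∀ pc ∈ ps.map Prod.fst, ∃ b : Int, pc.1 = some b := by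
    intro pc hpc
    rcases List.mem_map.mp hpc with ⟨pr, hpr, rfl⟩
    obtain ⟨m, c, h1, -⟩ := hinv pr hpr
    exact ⟨m, by rw [h1]⟩
  obtain ⟨mp, hmp, hub, pcm, hpcm, hpcm1⟩ :=
    foldl_oMax_spec (ps.map Prod.fst) (by simpa using hpsne) hall
  have hcs : ∀ pc ∈ ps.map Prod.fst, ∃ b, pc.1 = some b ∧ b ≤ mp := by
    intro pc hpc
    obtain ⟨b, hb⟩ := hall pc hpc
    exact ⟨b, hb, hub pc hpc b hb⟩
  have hub' : ∀ pr ∈ ps, ∀ p ∈ pr.2, p.1 ≤ mp := by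
    intro pr hpr p hp
    obtain ⟨m, c, h1, -, -, hkey, -, -⟩ := hinv pr hpr
    have h2 := (hkey p hp).2.1
    have h3 : m ≤ mp := hub pr.1 (List.mem_map_of_mem hpr) m (by rw [h1])
    omega
  have hpos0 : ∀ pr ∈ ps, ∀ p ∈ pr.2, 0 < p.2 := by
    intro pr hpr p hp
    obtain ⟨m, c, -, -, -, hkey, -, -⟩ := hinv pr hpr
    exact (hkey p hp).2.2
  -- B side: the merged list
  set upR : RepL := (up?.map Prod.snd).getD [] with hupR
  set leftR : RepL := (left?.map Prod.snd).getD [] with hleftR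
  set merged := pvMerge (pvShift upR g) (pvShift leftR g) with hmerged
  have hlkup : ∀ k : Int, lkL upR k = (up?.toList.map (fun pr => lkL pr.2 k)).sum := by
    intro k
    cases up? <;> simp [hupR, lkL_nil]
  have hlkleft : ∀ k : Int, lkL leftR k = (left?.toList.map (fun pr => lkL pr.2 k)).sum := by
    intro k
    cases left? <;> simp [hleftR, lkL_nil]
  have hlkm : ∀ k : Int, lkL merged k = (ps.map (fun pr => lkL pr.2 (k - g))).sum := by
    intro k
    rw [hmerged, lkL_merge, lkL_shift, lkL_shift, hlkup, hlkleft, hps, List.map_append,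
      List.sum_append]
  have hmemR : ∀ p : Int × Int, (p ∈ upR ∨ p ∈ leftR) → ∃ pr ∈ ps, p ∈ pr.2 := by
    intro p hp
    rcases hp with hp | hp
    · cases h : up? with
      | none => rw [hupR, h] at hp; cases hp
      | some pr =>
        rw [hupR, h] at hp
        exact ⟨pr, by simp [hps, h], hp⟩
    · cases h : left? with
      | none => rw [hleftR, h] at hp; cases hp
      | some pr =>
        rw [hleftR, h] at hp
        exact ⟨pr, by simp [hps, h], hp⟩
  have hubm : ∀ p ∈ merged, p.1 ≤ mp + g := by
    intro p hp
    rcases merge_key_mem _ _ p hp with ⟨q, hq, hqe⟩ | ⟨q, hq, hqe⟩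
    · rcases List.mem_map.mp hq with ⟨r, hr, rfl⟩
      obtain ⟨pr, hpr, hrm⟩ := hmemR r (Or.inl hr)
      have := hub' pr hpr r hrm
      simp only [] at hqe
      omega
    · rcases List.mem_map.mp hq with ⟨r, hr, rfl⟩
      obtain ⟨pr, hpr, hrm⟩ := hmemR r (Or.inr hr)
      have := hub' pr hpr r hrm
      simp only [] at hqe
      omega
  have hposm : ∀ p ∈ merged, 0 < p.2 := by
    refine merge_pos _ _ ?_ ?_
    · refine shift_pos _ _ ?_
      intro p hp
      obtain ⟨pr, hpr, hrm⟩ := hmemR p (Or.inl hp)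
      exact hpos0 pr hpr p hrm
    · refine shift_pos _ _ ?_
      intro p hp
      obtain ⟨pr, hpr, hrm⟩ := hmemR p (Or.inr hp)
      exact hpos0 pr hpr p hrm
  have hdescUp : DescL upR := by
    cases h : up? with
    | none => rw [hupR, h]; exact List.Pairwise.nil
    | some pr =>
      obtain ⟨m, c, -, -, -, -, hd, -⟩ := hinv pr (by simp [hps, h])
      rw [hupR, h]
      exact hd
  have hdescLeft : DescL leftR := by
    cases h : left? with
    | none => rw [hleftR, h]; exact List.Pairwise.nil
    | some pr =>
      obtain ⟨m, c, -, -, -, -, hd, -⟩ := hinv pr (by simp [hps, h])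
      rw [hleftR, h]
      exact hd
  have hdescm : DescL merged :=
    merge_desc _ _ (shift_desc _ _ hdescUp) (shift_desc _ _ hdescLeft)
  -- termwise correspondence of A's contributions and B's lookups
  have hterm : ∀ e : Nat, e < Kn → ∀ pr ∈ ps, contribA mp e pr.1 = lkL pr.2 (mp - e) := by
    intro e he pr hpr
    obtain ⟨m, c, h1, hlen, hpt, hkey, hd, hm⟩ := hinv pr hpr
    have hoff : pvOff mp pr.1 = mp - m := by rw [pvOff, h1]
    have hmle : m ≤ mp := hub pr.1 (List.mem_map_of_mem hpr) m (by rw [h1])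
    rw [contribA, hoff]
    by_cases hle : mp - m ≤ (e : Int)
    · rw [if_pos hle]
      have hidx : e - (mp - m).toNat < Kn := by omega
      have hc2 : pr.1.2 = c := by rw [h1]
      rw [hc2, hpt _ hidx,
        show (m - ((e - (mp - m).toNat : Nat) : Int)) = mp - (e : Int) from by omega]
    · rw [if_neg hle]
      symm
      exact lkL_eq_zero_of_gt pr.2 m (fun p hp => (hkey p hp).2.1) _ (by omega)
  have hAcnt : ∀ e : Nat, e < Kn →
      (pvCellA K Kn g (ps.map Prod.fst) (List.replicate Kn (0 : Int))).2.getD e 0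
        = lkL merged (mp + g - e) := by
    intro e he
    obtain ⟨-, h2⟩ := cellA_cnt K hK Kn hKn g mp _ hcs hmp e he
    rw [h2, hlkm, show mp + g - (e : Int) - g = mp - (e : Int) from by ring, List.map_map]
    exact congrArg List.sum (List.map_congr_left fun pr hpr => hterm e he pr hpr)
  have hAlen : (pvCellA K Kn g (ps.map Prod.fst) (List.replicate Kn (0 : Int))).2.length = Kn :=
    (cellA_cnt K hK Kn hKn g mp _ hcs hmp 0 hKn1).1
  -- the merged list has an entry at the new best mp + g
  have hm'mem : ∃ v, (mp + g, v) ∈ merged := by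
    rcases List.mem_map.mp hpcm with ⟨prm, hprm, rfl⟩
    obtain ⟨m, c, h1, -, -, hkey, hd, cm, hm⟩ := hinv prm hprm
    have hmeq : m = mp := by
      rw [h1] at hpcm1
      exact Option.some_inj.mp (by simpa using hpcm1)
    have hcm : lkL prm.2 mp = cm := hmeq ▸ lkL_of_mem_desc prm.2 hd m cm hm
    have hcmpos : 0 < cm := (hkey (m, cm) hm).2.2
    have hsum : 0 < lkL merged (mp + g) := by
      rw [hlkm, show mp + g - g = mp from by ring]
      have hnn : ∀ x ∈ ps.map (fun pr => lkL pr.2 mp), 0 ≤ x := by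
        intro x hx
        rcases List.mem_map.mp hx with ⟨pr', hpr', rfl⟩
        exact lkL_nonneg pr'.2 (hpos0 pr' hpr') mp
      have hmem2 : lkL prm.2 mp ∈ ps.map (fun pr => lkL pr.2 mp) := List.mem_map_of_mem hprm
      have := List.single_le_sum hnn _ hmem2
      omega
    exact lkL_ne_zero_mem merged (mp + g) (by omega)
  have hhead : (merged.headD (0, 0)).1 = mp + g := head_eq_of_max merged hdescm _ hm'mem hubm
  have hcellB : cellB K g upR leftR
      = merged.filter (fun p => decide (mp + g - K ≤ p.1)) := by
    rw [cellB, ← hmerged, hhead]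
  rw [hcellB]
  refine ⟨mp + g, (pvCellA K Kn g (ps.map Prod.fst) (List.replicate Kn (0 : Int))).2,
    Prod.ext (cellA_fst K Kn g (ps.map Prod.fst) (List.replicate Kn (0 : Int)) mp hmp) rfl,
    hAlen, ?_, ?_, ?_, ?_⟩
  · intro e he
    rw [hAcnt e he,
      show (fun p : Int × Int => decide (mp + g - K ≤ p.1))
        = (fun p : Int × Int => (fun k => decide (mp + g - K ≤ k)) p.1) from rfl,
      lkL_filter (fun k => decide (mp + g - K ≤ k)) merged (mp + g - e),
      if_pos (by simp only [decide_eq_true_eq]; omega)]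
  · intro p hp
    obtain ⟨hmem, hcond⟩ := List.mem_filter.mp hp
    exact ⟨by simpa using hcond, hubm p hmem, hposm p hmem⟩
  · exact List.Pairwise.sublist List.filter_sublist hdescm
  · obtain ⟨v, hv⟩ := hm'mem
    exact ⟨v, List.mem_filter.mpr ⟨hv, by simp only [decide_eq_true_eq]; omega⟩⟩

theorem cell0_inv (K : Int) (hK : 0 ≤ K) (Kn : Nat) (hKn : (Kn : Int) = K + 1) (g : Int) :
    InvCell K Kn (cellA0 Kn g) [(g, 1)] := by
  refine ⟨g, (List.replicate Kn (0 : Int)).set 0 1, rfl, by simp, ?_, ?_, ?_, ⟨1, by simp⟩⟩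
  · intro e he
    by_cases he0 : e = 0
    · subst he0
      rw [getD_set_eq_of_lt _ _ _ _ (by simpa using he), lkL_cons]
      simp [lkL_nil]
    · rw [getD_set_ne _ _ _ _ _ (fun h => he0 h.symm), lkL_cons,
        if_neg (by simp only []; omega), lkL_nil]
      simp [List.getD_eq_getElem?_getD, List.getElem?_replicate]
      split <;> rfl
  · intro p hp
    rw [List.mem_singleton] at hp
    subst hp
    refine ⟨by simp only []; omega, by simp only []; omega, by norm_num⟩
  · exact List.pairwise_singleton _ _

-- ================= rows =================

theorem cellsA_length (K : Int) (Kn : Nat) (up? : Option (List CellA)) (vals : List Int)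
    (n : Nat) : (cellsA K Kn up? vals n).length = n := by
  induction n with
  | zero => rfl
  | succ n ih => simp [cellsA, ih]

theorem cellsB_length (K : Int) (up? : Option (List RepL)) (vals : List Int)
    (n : Nat) : (cellsB K up? vals n).length = n := by
  induction n with
  | zero => rfl
  | succ n ih => simp [cellsB, ih]

def UpInv (K : Int) (Kn N : Nat) : Option (List CellA) → Option (List RepL) → Prop
  | none, none => True
  | some ua, some ub => ua.length = N ∧ InvRow K Kn ua ub
  | _, _ => False

theorem cells_inv (K : Int) (hK : 0 ≤ K) (Kn : Nat) (hKn : (Kn : Int) = K + 1) (N : Nat)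
    (upA : Option (List CellA)) (upB : Option (List RepL)) (hup : UpInv K Kn N upA upB)
    (vals : List Int) (n : Nat) (hn : n ≤ N) :
    InvRow K Kn (cellsA K Kn upA vals n) (cellsB K upB vals n) := by
  induction n with
  | zero =>
    refine ⟨by rw [cellsA_length, cellsB_length], ?_⟩
    intro j hj
    rw [cellsA_length] at hj
    exact absurd hj (Nat.not_lt_zero j)
  | succ n ih =>
    obtain ⟨hlen, hcells⟩ := ih (by omega)
    refine ⟨by rw [cellsA_length, cellsB_length], ?_⟩
    intro j hj
    rw [cellsA_length] at hj
    cases upA with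
    | none =>
      cases upB with
      | some ub => exact hup.elim
      | none =>
        simp only [cellsA, cellsB, Option.isNone_none, true_and]
        by_cases hjn : j < n
        · rw [List.getD_append _ _ _ _ (by rw [cellsA_length]; exact hjn),
            List.getD_append _ _ _ _ (by rw [cellsB_length]; exact hjn)]
          exact hcells j (by rw [cellsA_length]; exact hjn)
        · have hjeq : j = n := by omega
          subst hjeq
          rw [List.getD_append_right _ _ _ _ (by rw [cellsA_length]),
            List.getD_append_right _ _ _ _ (by rw [cellsB_length]),
            cellsA_length, cellsB_length, Nat.sub_self]
          simp only [List.getD_cons_zero]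
          by_cases hn0 : j = 0
          · rw [if_pos hn0, if_pos hn0]
            exact cell0_inv K hK Kn hKn (vals.getD 0 0)
          · rw [if_neg hn0, if_neg hn0]
            have hc := cell_inv K hK Kn hKn (vals.getD j 0)
              none
              (some ((cellsA K Kn none vals j).getD (j - 1) dfltA,
                     (cellsB K none vals j).getD (j - 1) []))
              (by simp)
              (by
                intro p hp
                simp only [Option.toList_none, Option.toList_some, List.nil_append,
                  List.mem_cons, List.not_mem_nil, or_false] at hp
                subst hp
                exact hcells (j - 1) (by rw [cellsA_length]; omega))
            simpa [Nat.pos_of_ne_zero hn0] using hc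
    | some ua =>
      cases upB with
      | none => exact hup.elim
      | some ub =>
        obtain ⟨hlua, hlrow, hrowcells⟩ := hup
        simp only [cellsA, cellsB, Option.isNone_some, Bool.false_eq_true, false_and, if_false]
        by_cases hjn : j < n
        · rw [List.getD_append _ _ _ _ (by rw [cellsA_length]; exact hjn),
            List.getD_append _ _ _ _ (by rw [cellsB_length]; exact hjn)]
          exact hcells j (by rw [cellsA_length]; exact hjn)
        · have hjeq : j = n := by omega
          subst hjeq
          rw [List.getD_append_right _ _ _ _ (by rw [cellsA_length]),
            List.getD_append_right _ _ _ _ (by rw [cellsB_length]),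
            cellsA_length, cellsB_length, Nat.sub_self]
          simp only [List.getD_cons_zero]
          by_cases hn0 : j = 0
          · subst hn0
            have hc := cell_inv K hK Kn hKn (vals.getD 0 0)
              (some (ua.getD 0 dfltA, ub.getD 0 []))
              none
              (by simp)
              (by
                intro p hp
                simp only [Option.toList_none, Option.toList_some, List.append_nil,
                  List.mem_cons, List.not_mem_nil, or_false] at hp
                subst hp
                exact hrowcells 0 (by omega))
            simpa using hc
          · have hc := cell_inv K hK Kn hKn (vals.getD j 0)
              (some (ua.getD j dfltA, ub.getD j []))
              (some ((cellsA K Kn (some ua) vals j).getD (j - 1) dfltA,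
                     (cellsB K (some ub) vals j).getD (j - 1) []))
              (by simp)
              (by
                intro p hp
                simp only [Option.toList_some, List.cons_append, List.nil_append,
                  List.mem_cons, List.not_mem_nil, or_false] at hp
                rcases hp with h | h
                · subst h
                  exact hrowcells j (by omega)
                · subst h
                  exact hcells (j - 1) (by rw [cellsA_length]; omega))
            simpa [Nat.pos_of_ne_zero hn0] using hc

theorem rows_inv (K : Int) (hK : 0 ≤ K) (Kn : Nat) (hKn : (Kn : Int) = K + 1) (N : Nat)
    (rows : List (List Int)) :
    ∀ (upA : Option (List CellA)) (upB : Option (List RepL)), UpInv K Kn N upA upB →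
    (rowsA K Kn N upA rows).length = rows.length ∧
    ∀ i, i < rows.length →
      ((rowsA K Kn N upA rows).getD i []).length = N ∧
      InvRow K Kn ((rowsA K Kn N upA rows).getD i []) ((rowsB K N upB rows).getD i []) := by
  induction rows with
  | nil =>
    intro upA upB _
    exact ⟨rfl, by intro i hi; exact absurd hi (Nat.not_lt_zero i)⟩
  | cons vals rest ih =>
    intro upA upB hup
    have hrowInv := cells_inv K hK Kn hKn N upA upB hup vals N le_rfl
    have hnext : UpInv K Kn N (some (cellsA K Kn upA vals N)) (some (cellsB K upB vals N)) :=
      ⟨cellsA_length K Kn upA vals N, hrowInv⟩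
    obtain ⟨ihlen, ihcells⟩ := ih _ _ hnext
    refine ⟨by simp [rowsA, ihlen], ?_⟩
    intro i hi
    cases i with
    | zero =>
      rw [show rowsA K Kn N upA (vals :: rest)
          = cellsA K Kn upA vals N :: rowsA K Kn N (some (cellsA K Kn upA vals N)) rest by
          simp only [rowsA],
        show rowsB K N upB (vals :: rest)
          = cellsB K upB vals N :: rowsB K N (some (cellsB K upB vals N)) rest by
          simp only [rowsB],
        List.getD_cons_zero, List.getD_cons_zero]
      exact ⟨cellsA_length K Kn upA vals N, hrowInv⟩
    | succ i =>
      rw [show rowsA K Kn N upA (vals :: rest)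
          = cellsA K Kn upA vals N :: rowsA K Kn N (some (cellsA K Kn upA vals N)) rest by
          simp only [rowsA],
        show rowsB K N upB (vals :: rest)
          = cellsB K upB vals N :: rowsB K N (some (cellsB K upB vals N)) rest by
          simp only [rowsB],
        List.getD_cons_succ, List.getD_cons_succ]
      exact ihcells i (by simpa using hi)

-- ================= the two ports compute the row recursions =================

-- generic list-access helpers
theorem getD_map' {α β : Type} (f : α → β) (l : List α) (i : Nat) (d : α) :
    (l.map f).getD i (f d) = f (l.getD i d) := by
  rw [List.getD_eq_getElem?_getD, List.getElem?_map, List.getD_eq_getElem?_getD]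
  cases l[i]? <;> rfl

theorem getD_take' {α : Type} (l : List α) (i k : Nat) (h : i < k) (d : α) :
    (l.take k).getD i d = l.getD i d := by
  rw [List.getD_eq_getElem?_getD, List.getElem?_take_of_lt h, List.getD_eq_getElem?_getD]

theorem getD_replicate' {α : Type} (n i : Nat) (a d : α) (h : i < n) :
    (List.replicate n a).getD i d = a := by
  rw [List.getD_eq_getElem?_getD, List.getElem?_replicate, if_pos h]; rfl

theorem set_append_cons {α : Type} (A B : List α) (x v : α) :
    (A ++ x :: B).set A.length v = A ++ v :: B := by
  induction A with
  | nil => rfl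
  | cons a t ih => simp [ih]

-- B: the inner loop builds exactly cellsB
theorem rowB_eq_cellsB (K : Int) (prev : List RepL) (i : Int) (vals : List Int)
    (hi : i = 0 ∨ 0 < i) :
    ∀ n : Nat, (List.range n).foldl
        (fun curRow j => curRow ++ [pvCellBStep K prev curRow (i, vals) j]) []
      = cellsB K (if i = 0 then none else some prev) vals n := by
  intro n
  induction n with
  | zero => rcases hi with hi | hi <;> simp [hi, cellsB]
  | succ n ih =>
    rw [List.range_succ, List.foldl_append, List.foldl_cons, List.foldl_nil, ih]
    rcases hi with hi | hi
    · subst hi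
      simp only [if_pos rfl] at *
      by_cases hn0 : n = 0
      · subst hn0
        simp [cellsB, pvCellBStep]
      · simp [cellsB, cellB, pvCellBStep, hn0, Nat.pos_of_ne_zero hn0, pvShift]
    · have hne : ¬ (i = 0) := by omega
      simp only [if_neg hne] at *
      by_cases hn0 : n = 0
      · subst hn0
        simp [cellsB, cellB, pvCellBStep, hne, hi, pvMerge_nil_right, pvShift]
      · simp [cellsB, cellB, pvCellBStep, hne, hi, hn0, Nat.pos_of_ne_zero hn0]

theorem rowsB_length (K : Int) (N : Nat) :
    ∀ (up : Option (List RepL)) (rows : List (List Int)),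
    (rowsB K N up rows).length = rows.length := by
  intro up rows
  induction rows generalizing up with
  | nil => rfl
  | cons v r ih => simp [rowsB, ih]

theorem outerB_eq (K : Int) (N : Nat) (rows : List (List Int)) :
    ∀ (i0 : Int), 1 ≤ i0 → ∀ prev : List RepL,
    (PySem.List.enumerate rows i0).foldl (pvRowB K N) prev
      = (rowsB K N (some prev) rows).getD (rows.length - 1) prev := by
  induction rows with
  | nil => intro i0 _ prev; rfl
  | cons v r ih =>
    intro i0 hi0 prev
    rw [PySem.List.enumerate_cons, List.foldl_cons]
    have h1 : pvRowB K N prev (i0, v) = cellsB K (some prev) v N := by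
      have h := rowB_eq_cellsB K prev i0 v (Or.inr (by omega)) N
      rw [if_neg (by omega)] at h
      exact h
    rw [h1, ih (i0 + 1) (by omega) (cellsB K (some prev) v N)]
    rw [show rowsB K N (some prev) (v :: r)
        = cellsB K (some prev) v N :: rowsB K N (some (cellsB K (some prev) v N)) r by
      simp only [rowsB]]
    cases r with
    | nil => rfl
    | cons v2 r2 =>
      have hlen : (rowsB K N (some (cellsB K (some prev) v N)) (v2 :: r2)).length
          = (v2 :: r2).length := rowsB_length K N _ _
      rw [show (v :: v2 :: r2).length - 1 = ((v2 :: r2).length - 1) + 1 by simp,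
        List.getD_cons_succ,
        List.getD_eq_getElem _ _ (by rw [hlen]; simp),
        List.getD_eq_getElem _ _ (by rw [hlen]; simp)]

-- ========== A: row recursion accessors ==========

theorem headD_eq_getD {α : Type} (l : List α) (d : α) : l.headD d = l.getD 0 d := by
  cases l <;> rfl

theorem cellsA_take (K : Int) (Kn : Nat) (up? : Option (List CellA)) (vals : List Int) :
    ∀ n j : Nat, j ≤ n → (cellsA K Kn up? vals n).take j = cellsA K Kn up? vals j := by
  intro n
  induction n with
  | zero => intro j hj; interval_cases j; rfl
  | succ n ih =>
    intro j hj
    by_cases hje : j = n + 1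
    · subst hje
      have h := List.take_length (l := cellsA K Kn up? vals (n + 1))
      rw [cellsA_length] at h
      exact h
    · have hjn : j ≤ n := by omega
      simp only [cellsA]
      rw [List.take_append_of_le_length (by rw [cellsA_length]; omega)]
      exact ih j hjn

theorem rowsA_length (K : Int) (Kn N : Nat) :
    ∀ (up : Option (List CellA)) (rows : List (List Int)),
    (rowsA K Kn N up rows).length = rows.length := by
  intro up rows
  induction rows generalizing up with
  | nil => rfl
  | cons v r ih => simp [rowsA, ih]

theorem cellsA_getD_unfold (K : Int) (Kn : Nat) (up? : Option (List CellA)) (vals : List Int)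
    (j n : Nat) (hj : j < n) :
    (cellsA K Kn up? vals n).getD j dfltA = (cellsA K Kn up? vals (j + 1)).getD j dfltA := by
  rw [← cellsA_take K Kn up? vals n (j + 1) (by omega), getD_take' _ j (j + 1) (by omega)]

theorem cellsA_getD_stable (K : Int) (Kn : Nat) (up? : Option (List CellA)) (vals : List Int)
    (j n m : Nat) (hn : j < n) (hm : j < m) :
    (cellsA K Kn up? vals n).getD j dfltA = (cellsA K Kn up? vals m).getD j dfltA := by
  rw [cellsA_getD_unfold K Kn up? vals j n hn, cellsA_getD_unfold K Kn up? vals j m hm]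

theorem cellsA_getD_none_zero (K : Int) (Kn : Nat) (vals : List Int) (n : Nat) (h : 0 < n) :
    (cellsA K Kn none vals n).getD 0 dfltA = cellA0 Kn (vals.getD 0 0) := by
  rw [cellsA_getD_unfold K Kn none vals 0 n h]
  simp [cellsA]

theorem cellsA_getD_some_zero (K : Int) (Kn : Nat) (ua : List CellA) (vals : List Int)
    (n : Nat) (h : 0 < n) :
    (cellsA K Kn (some ua) vals n).getD 0 dfltA
      = pvCellA K Kn (vals.getD 0 0) [ua.getD 0 dfltA] (List.replicate Kn (0 : Int)) := by
  rw [cellsA_getD_unfold K Kn (some ua) vals 0 n h]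
  simp [cellsA]

theorem cellsA_getD_none_pos (K : Int) (Kn : Nat) (vals : List Int) (j n : Nat)
    (h0 : 0 < j) (hj : j < n) :
    (cellsA K Kn none vals n).getD j dfltA
      = pvCellA K Kn (vals.getD j 0) [(cellsA K Kn none vals n).getD (j - 1) dfltA]
          (List.replicate Kn (0 : Int)) := by
  rw [cellsA_getD_unfold K Kn none vals j n hj]
  have hstep : (cellsA K Kn none vals (j + 1)).getD j dfltA
      = pvCellA K Kn (vals.getD j 0) [(cellsA K Kn none vals j).getD (j - 1) dfltA]
          (List.replicate Kn (0 : Int)) := by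
    simp only [cellsA]
    rw [List.getD_append_right _ _ _ _ (by rw [cellsA_length]), cellsA_length, Nat.sub_self,
      List.getD_cons_zero, if_neg (by omega), if_pos h0]
    rfl
  rw [hstep, cellsA_getD_stable K Kn none vals (j - 1) j n (by omega) (by omega)]

theorem cellsA_getD_some_pos (K : Int) (Kn : Nat) (ua : List CellA) (vals : List Int)
    (j n : Nat) (h0 : 0 < j) (hj : j < n) :
    (cellsA K Kn (some ua) vals n).getD j dfltA
      = pvCellA K Kn (vals.getD j 0)
          [ua.getD j dfltA, (cellsA K Kn (some ua) vals n).getD (j - 1) dfltA]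
          (List.replicate Kn (0 : Int)) := by
  rw [cellsA_getD_unfold K Kn (some ua) vals j n hj]
  have hstep : (cellsA K Kn (some ua) vals (j + 1)).getD j dfltA
      = pvCellA K Kn (vals.getD j 0)
          [ua.getD j dfltA, (cellsA K Kn (some ua) vals j).getD (j - 1) dfltA]
          (List.replicate Kn (0 : Int)) := by
    simp only [cellsA]
    rw [List.getD_append_right _ _ _ _ (by rw [cellsA_length]), cellsA_length, Nat.sub_self,
      List.getD_cons_zero, if_neg (by simp), if_pos h0]
    rfl
  rw [hstep, cellsA_getD_stable K Kn (some ua) vals (j - 1) j n (by omega) (by omega)]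

theorem rowsA_getD (K : Int) (Kn N : Nat) :
    ∀ (rows : List (List Int)) (up : Option (List CellA)) (i : Nat), i < rows.length →
    (rowsA K Kn N up rows).getD i []
      = cellsA K Kn (if i = 0 then up else some ((rowsA K Kn N up rows).getD (i - 1) []))
          (rows.getD i []) N := by
  intro rows
  induction rows with
  | nil => intro up i hi; exact absurd hi (Nat.not_lt_zero i)
  | cons v r ih =>
    intro up i hi
    rw [show rowsA K Kn N up (v :: r)
        = cellsA K Kn up v N :: rowsA K Kn N (some (cellsA K Kn up v N)) r by
      simp only [rowsA]]
    cases i with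
    | zero => rfl
    | succ i =>
      rw [List.getD_cons_succ, ih (some (cellsA K Kn up v N)) i (by simpa using hi)]
      cases i with
      | zero => rfl
      | succ i' => rfl

-- ========== A: the table states ==========

def tabP {β : Type} (f : CellA → β) (d0 : β) (RA : List (List CellA)) (M N i p : Nat) :
    List (List β) :=
  (RA.take i).map (List.map f) ++
    ((((RA.getD i []).take p).map f) ++ List.replicate (N - p) d0) ::
    List.replicate (M - i - 1) (List.replicate N d0)

def doneTab {β : Type} (f : CellA → β) (d0 : β) (RA : List (List CellA)) (M N i : Nat) :
    List (List β) :=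
  (RA.take i).map (List.map f) ++ List.replicate (M - i) (List.replicate N d0)

theorem tabP_len_left {β : Type} (f : CellA → β) (RA : List (List CellA)) (i : Nat)
    (hi : i ≤ RA.length) : ((RA.take i).map (List.map f)).length = i := by
  rw [List.length_map, List.length_take]; omega

theorem tabP_get_prev {β : Type} (f : CellA → β) (d0 : β) (RA : List (List CellA))
    (M N i p i' j' : Nat) (hi' : i' < i) (hi : i ≤ RA.length) :
    pvGet2 (tabP f d0 RA M N i p) i' j' (f dfltA) = f ((RA.getD i' []).getD j' dfltA) := by
  rw [pvGet2, tabP, List.getD_append _ _ _ _ (by rw [tabP_len_left f RA i hi]; omega)]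
  rw [show ([] : List β) = List.map f [] from rfl, getD_map' (List.map f) _ i' [],
    getD_take' _ i' i hi' [], getD_map']

theorem tabP_get_cur {β : Type} (f : CellA → β) (d0 : β) (RA : List (List CellA))
    (M N i p j' : Nat) (hj : j' < p) (hp : p ≤ (RA.getD i []).length) (hi : i ≤ RA.length) :
    pvGet2 (tabP f d0 RA M N i p) i j' (f dfltA) = f ((RA.getD i []).getD j' dfltA) := by
  rw [pvGet2, tabP, List.getD_append_right _ _ _ _ (le_of_eq (tabP_len_left f RA i hi)),
    tabP_len_left f RA i hi, Nat.sub_self, List.getD_cons_zero,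
    List.getD_append _ _ _ _ (by rw [List.length_map, List.length_take]; omega),
    getD_map' f _ j' dfltA, getD_take' _ j' p hj]

theorem tabP_get_fill {β : Type} (f : CellA → β) (d0 : β) (RA : List (List CellA))
    (M N i p : Nat) (dflt : β) (hp : p < N) (hi : i ≤ RA.length)
    (hple : (((RA.getD i []).take p).map f).length = p) :
    pvGet2 (tabP f d0 RA M N i p) i p dflt = d0 := by
  rw [pvGet2, tabP, List.getD_append_right _ _ _ _ (le_of_eq (tabP_len_left f RA i hi)),
    tabP_len_left f RA i hi, Nat.sub_self, List.getD_cons_zero,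
    List.getD_append_right _ _ _ _ (le_of_eq hple), hple, Nat.sub_self,
    getD_replicate' (N - p) 0 d0 dflt (by omega)]

theorem tabP_set {β : Type} (f : CellA → β) (d0 : β) (RA : List (List CellA))
    (M N i p : Nat) (hp : p < N) (hi : i ≤ RA.length) (hrow : (RA.getD i []).length = N) :
    pvSet2 (tabP f d0 RA M N i p) i p (f ((RA.getD i []).getD p dfltA))
      = tabP f d0 RA M N i (p + 1) := by
  have hA := tabP_len_left f RA i hi
  have hmt : (((RA.getD i []).take p).map f).length = p := by
    rw [List.length_map, List.length_take]; omega
  have hget : (tabP f d0 RA M N i p).getD i []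
      = (((RA.getD i []).take p).map f) ++ List.replicate (N - p) d0 := by
    rw [tabP, List.getD_append_right _ _ _ _ (le_of_eq hA), hA, Nat.sub_self,
      List.getD_cons_zero]
  have hrowset : ((((RA.getD i []).take p).map f) ++ List.replicate (N - p) d0).set p
        (f ((RA.getD i []).getD p dfltA))
      = (((RA.getD i []).take (p + 1)).map f) ++ List.replicate (N - (p + 1)) d0 := by
    rw [show N - p = (N - p - 1) + 1 by omega, List.replicate_succ]
    have hset := set_append_cons (((RA.getD i []).take p).map f)
      (List.replicate (N - p - 1) d0) d0 (f ((RA.getD i []).getD p dfltA))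
    rw [hmt] at hset
    rw [hset, List.take_succ_eq_append_getElem (by omega), List.map_append,
      List.getD_eq_getElem (RA.getD i []) dfltA (by omega)]
    simp
    omega
  have hsetT := set_append_cons ((RA.take i).map (List.map f))
    (List.replicate (M - i - 1) (List.replicate N d0))
    ((((RA.getD i []).take p).map f) ++ List.replicate (N - p) d0)
    (((((RA.getD i []).take (p + 1)).map f) ++ List.replicate (N - (p + 1)) d0))
  rw [hA] at hsetT
  rw [pvSet2, hget, hrowset, tabP, hsetT]
  rfl

theorem tabP_row_done {β : Type} (f : CellA → β) (d0 : β) (RA : List (List CellA))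
    (M N i : Nat) (hi : i < M) (hiR : i < RA.length) (hrow : (RA.getD i []).length = N) :
    tabP f d0 RA M N i N = doneTab f d0 RA M N (i + 1) := by
  have htake : (RA.getD i []).take N = RA.getD i [] := by rw [← hrow]; exact List.take_length
  have hgd : RA.getD i [] = RA[i] := List.getD_eq_getElem RA [] hiR
  rw [tabP, doneTab, htake, Nat.sub_self, List.replicate_zero, List.append_nil,
    List.take_succ_eq_append_getElem hiR, List.map_append, Nat.sub_sub]
  simp [hgd, List.getD_eq_getElem?_getD, List.getElem?_eq_getElem hiR]

theorem doneTab_start {β : Type} (f : CellA → β) (d0 : β) (RA : List (List CellA))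
    (M N i : Nat) (hi : i < M) :
    doneTab f d0 RA M N i = tabP f d0 RA M N i 0 := by
  rw [tabP, doneTab, List.take_zero, List.map_nil, List.nil_append, Nat.sub_zero,
    show M - i = (M - i - 1) + 1 by omega, List.replicate_succ]
  rw [show M - i - 1 + 1 - 1 = M - i - 1 by omega]

theorem stepA_step (grid : List (List Int)) (K : Int) (Kn : Nat)
    (RA : List (List CellA)) (M N : Nat)
    (hRA : RA = rowsA K Kn N none grid)
    (hM : M = grid.length)
    (hrows : ∀ r, r < M → (RA.getD r []).length = N)
    (i j : Nat) (hiM : i < M) (hjN : j < N) (hnb : ¬(i = 0 ∧ j = 0)) :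
    pvStepA grid K Kn
      (tabP Prod.fst none RA M N i j, tabP Prod.snd (List.replicate Kn (0 : Int)) RA M N i j) i j
      = (tabP Prod.fst none RA M N i (j + 1),
         tabP Prod.snd (List.replicate Kn (0 : Int)) RA M N i (j + 1)) := by
  have hiR : i ≤ RA.length := by rw [hRA, rowsA_length]; omega
  have hrowi : (RA.getD i []).length = N := hrows i hiM
  have hRAi : RA.getD i []
      = cellsA K Kn (if i = 0 then none else some (RA.getD (i - 1) [])) (grid.getD i []) N := by
    conv_lhs => rw [hRA]
    rw [rowsA_getD K Kn N grid none i (by omega), ← hRA]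
  have hfill : (((RA.getD i []).take j).map Prod.snd).length = j := by
    rw [List.length_map, List.length_take]; omega
  simp only [pvStepA]
  rw [if_neg hnb]
  rw [show (pvGet2 (tabP Prod.fst none RA M N i j, tabP Prod.snd
      (List.replicate Kn (0 : Int)) RA M N i j).2 i j [])
    = List.replicate Kn (0 : Int) from
    tabP_get_fill Prod.snd (List.replicate Kn (0 : Int)) RA M N i j [] hjN hiR hfill]
  by_cases hi0 : i = 0
  · subst hi0
    have hj0 : 0 < j := by omega
    have hRA0 : RA.getD 0 [] = cellsA K Kn none (grid.getD 0 []) N := by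
      rw [hRAi]; simp
    rw [if_neg (by omega), if_pos hj0, List.nil_append]
    rw [show (pvGet2 (tabP Prod.fst none RA M N 0 j, tabP Prod.snd
        (List.replicate Kn (0 : Int)) RA M N 0 j).1 0 (j - 1) none)
      = ((RA.getD 0 []).getD (j - 1) dfltA).1 from
      tabP_get_cur Prod.fst none RA M N 0 j (j - 1) (by omega) (by omega) hiR]
    rw [show (pvGet2 (tabP Prod.fst none RA M N 0 j, tabP Prod.snd
        (List.replicate Kn (0 : Int)) RA M N 0 j).2 0 (j - 1) [])
      = ((RA.getD 0 []).getD (j - 1) dfltA).2 from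
      tabP_get_cur Prod.snd (List.replicate Kn (0 : Int)) RA M N 0 j (j - 1)
        (by omega) (by omega) hiR]
    have hcell : pvCellA K Kn (pvGet2 grid 0 j 0)
        [(((RA.getD 0 []).getD (j - 1) dfltA).1, ((RA.getD 0 []).getD (j - 1) dfltA).2)]
        (List.replicate Kn (0 : Int)) = (RA.getD 0 []).getD j dfltA := by
      rw [Prod.mk.eta]
      conv_rhs => rw [hRA0, cellsA_getD_none_pos K Kn (grid.getD 0 []) j N hj0 hjN, ← hRA0]
      rfl
    rw [hcell]
    exact Prod.ext (tabP_set Prod.fst none RA M N 0 j hjN hiR hrowi)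
      (tabP_set Prod.snd (List.replicate Kn (0 : Int)) RA M N 0 j hjN hiR hrowi)
  · have hipos : 0 < i := Nat.pos_of_ne_zero hi0
    have hRAi' : RA.getD i []
        = cellsA K Kn (some (RA.getD (i - 1) [])) (grid.getD i []) N := by
      rw [hRAi, if_neg hi0]
    rw [if_pos hipos]
    rw [show (pvGet2 (tabP Prod.fst none RA M N i j, tabP Prod.snd
        (List.replicate Kn (0 : Int)) RA M N i j).1 (i - 1) j none)
      = ((RA.getD (i - 1) []).getD j dfltA).1 from
      tabP_get_prev Prod.fst none RA M N i j (i - 1) j (by omega) hiR]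
    rw [show (pvGet2 (tabP Prod.fst none RA M N i j, tabP Prod.snd
        (List.replicate Kn (0 : Int)) RA M N i j).2 (i - 1) j [])
      = ((RA.getD (i - 1) []).getD j dfltA).2 from
      tabP_get_prev Prod.snd (List.replicate Kn (0 : Int)) RA M N i j (i - 1) j
        (by omega) hiR]
    by_cases hj0 : 0 < j
    · rw [if_pos hj0]
      rw [show (pvGet2 (tabP Prod.fst none RA M N i j, tabP Prod.snd
          (List.replicate Kn (0 : Int)) RA M N i j).1 i (j - 1) none)
        = ((RA.getD i []).getD (j - 1) dfltA).1 from
        tabP_get_cur Prod.fst none RA M N i j (j - 1) (by omega) (by omega) hiR]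
      rw [show (pvGet2 (tabP Prod.fst none RA M N i j, tabP Prod.snd
          (List.replicate Kn (0 : Int)) RA M N i j).2 i (j - 1) [])
        = ((RA.getD i []).getD (j - 1) dfltA).2 from
        tabP_get_cur Prod.snd (List.replicate Kn (0 : Int)) RA M N i j (j - 1)
          (by omega) (by omega) hiR]
      have hcell : pvCellA K Kn (pvGet2 grid i j 0)
          ([(((RA.getD (i - 1) []).getD j dfltA).1, ((RA.getD (i - 1) []).getD j dfltA).2)] ++
           [(((RA.getD i []).getD (j - 1) dfltA).1, ((RA.getD i []).getD (j - 1) dfltA).2)])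
          (List.replicate Kn (0 : Int)) = (RA.getD i []).getD j dfltA := by
        rw [Prod.mk.eta, Prod.mk.eta]
        conv_rhs => rw [hRAi', cellsA_getD_some_pos K Kn (RA.getD (i - 1) [])
          (grid.getD i []) j N hj0 hjN, ← hRAi']
        rfl
      rw [hcell]
      exact Prod.ext (tabP_set Prod.fst none RA M N i j hjN hiR hrowi)
        (tabP_set Prod.snd (List.replicate Kn (0 : Int)) RA M N i j hjN hiR hrowi)
    · have hj00 : j = 0 := by omega
      subst hj00
      rw [if_neg (by omega), List.append_nil]
      have hcell : pvCellA K Kn (pvGet2 grid i 0 0)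
          [(((RA.getD (i - 1) []).getD 0 dfltA).1, ((RA.getD (i - 1) []).getD 0 dfltA).2)]
          (List.replicate Kn (0 : Int)) = (RA.getD i []).getD 0 dfltA := by
        rw [Prod.mk.eta]
        conv_rhs => rw [hRAi', cellsA_getD_some_zero K Kn (RA.getD (i - 1) [])
          (grid.getD i []) N (by omega)]
        rfl
      rw [hcell]
      exact Prod.ext (tabP_set Prod.fst none RA M N i 0 hjN hiR hrowi)
        (tabP_set Prod.snd (List.replicate Kn (0 : Int)) RA M N i 0 hjN hiR hrowi)

theorem innerA_fold (grid : List (List Int)) (K : Int) (Kn : Nat)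
    (RA : List (List CellA)) (M N : Nat)
    (hRA : RA = rowsA K Kn N none grid)
    (hM : M = grid.length)
    (hrows : ∀ r, r < M → (RA.getD r []).length = N)
    (i : Nat) (hiM : i < M) (p0 : Nat) (hp0 : p0 = if i = 0 then 1 else 0) :
    ∀ j, j ≤ N →
    (List.range j).foldl (fun st j' => pvStepA grid K Kn st i j')
        (tabP Prod.fst none RA M N i p0, tabP Prod.snd (List.replicate Kn (0 : Int)) RA M N i p0)
      = (tabP Prod.fst none RA M N i (max j p0),
         tabP Prod.snd (List.replicate Kn (0 : Int)) RA M N i (max j p0)) := by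
  intro j
  induction j with
  | zero => intro _; rw [Nat.zero_max]; rfl
  | succ j ih =>
    intro hj
    rw [List.range_succ, List.foldl_append, List.foldl_cons, List.foldl_nil, ih (by omega)]
    by_cases hb : i = 0 ∧ j = 0
    · obtain ⟨hi0, hj0⟩ := hb
      subst hi0; subst hj0
      simp only [pvStepA]
      rw [if_pos (⟨trivial, trivial⟩ : (True ∧ True)), hp0]
      rfl
    · have hmax : max j p0 = j := by
        by_cases hi0 : i = 0
        · rw [hp0, if_pos hi0]
          omega
        · rw [hp0, if_neg hi0]
          omega
      have hmax2 : max (j + 1) p0 = j + 1 := by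
        by_cases hi0 : i = 0
        · rw [hp0, if_pos hi0]; omega
        · rw [hp0, if_neg hi0]; omega
      rw [hmax, hmax2, stepA_step grid K Kn RA M N hRA hM hrows i j hiM (by omega) hb]

theorem outerA_fold (grid : List (List Int)) (K : Int) (Kn : Nat)
    (RA : List (List CellA)) (M N : Nat)
    (hRA : RA = rowsA K Kn N none grid)
    (hM : M = grid.length)
    (hrows : ∀ r, r < M → (RA.getD r []).length = N)
    (hNpos : 0 < N) :
    ∀ i, 1 ≤ i → i ≤ M →
    (List.range i).foldl
        (fun st i' => (List.range N).foldl (fun st j => pvStepA grid K Kn st i' j) st)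
        (tabP Prod.fst none RA M N 0 1, tabP Prod.snd (List.replicate Kn (0 : Int)) RA M N 0 1)
      = (doneTab Prod.fst none RA M N i, doneTab Prod.snd (List.replicate Kn (0 : Int)) RA M N i) := by
  have hRAlen : RA.length = M := by rw [hRA, rowsA_length]; omega
  intro i
  induction i with
  | zero => intro h; exact absurd h (by omega)
  | succ i ih =>
    intro _ hiM
    by_cases hi1 : i = 0
    · subst hi1
      rw [show List.range 1 = [0] from rfl, List.foldl_cons, List.foldl_nil]
      rw [innerA_fold grid K Kn RA M N hRA hM hrows 0 (by omega) 1 (by simp) N le_rfl]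
      rw [show max N 1 = N by omega]
      rw [tabP_row_done Prod.fst none RA M N 0 (by omega) (by omega) (hrows 0 (by omega)),
        tabP_row_done Prod.snd (List.replicate Kn (0 : Int)) RA M N 0 (by omega) (by omega)
          (hrows 0 (by omega))]
    · have h1i : 1 ≤ i := by omega
      rw [List.range_succ, List.foldl_append, List.foldl_cons, List.foldl_nil,
        ih h1i (by omega)]
      rw [doneTab_start Prod.fst none RA M N i (by omega),
        doneTab_start Prod.snd (List.replicate Kn (0 : Int)) RA M N i (by omega)]
      rw [innerA_fold grid K Kn RA M N hRA hM hrows i (by omega) 0 (by simp [hi1]) N le_rfl]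
      rw [Nat.max_zero]
      rw [tabP_row_done Prod.fst none RA M N i (by omega) (by omega) (hrows i (by omega)),
        tabP_row_done Prod.snd (List.replicate Kn (0 : Int)) RA M N i (by omega) (by omega)
          (hrows i (by omega))]

theorem init_tab {β : Type} (f : CellA → β) (d0 : β) (RA : List (List CellA)) (M N : Nat)
    (hM : 0 < M) (hN : 0 < N) (hrow : (RA.getD 0 []).length = N) :
    pvSet2 (List.replicate M (List.replicate N d0)) 0 0 (f ((RA.getD 0 []).getD 0 dfltA))
      = tabP f d0 RA M N 0 1 := by
  have hrep : List.replicate M (List.replicate N d0)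
      = (List.replicate N d0) :: List.replicate (M - 1) (List.replicate N d0) := by
    conv_lhs => rw [show M = (M - 1) + 1 by omega, List.replicate_succ]
  have hrepN : List.replicate N d0 = d0 :: List.replicate (N - 1) d0 := by
    conv_lhs => rw [show N = (N - 1) + 1 by omega, List.replicate_succ]
  rw [pvSet2, hrep, List.getD_cons_zero, hrepN, List.set_cons_zero, List.set_cons_zero]
  rw [tabP, List.take_zero, List.map_nil, List.nil_append,
    List.take_succ_eq_append_getElem (by omega), List.take_zero, List.nil_append,
    List.getD_eq_getElem (RA.getD 0 []) dfltA (by omega)]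
  rw [← hrepN]
  rfl

theorem doneTab_get {β : Type} (f : CellA → β) (d0 : β) (RA : List (List CellA)) (M N : Nat)
    (hRAlen : RA.length = M) (df : β) (hdf : df = f dfltA) :
    pvGet2 (doneTab f d0 RA M N M) (M - 1) (N - 1) df
      = f ((RA.getD (M - 1) []).getD (N - 1) dfltA) := by
  subst hdf
  rw [doneTab, Nat.sub_self, List.replicate_zero, List.append_nil]
  have htake : RA.take M = RA := by rw [← hRAlen]; exact List.take_length
  rw [htake, pvGet2, show ([] : List β) = List.map f [] from rfl,
    getD_map' (List.map f) RA (M - 1) [], getD_map' f _ (N - 1) dfltA]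

theorem bf2_eq_rowsA (grid : List (List Int)) (K : Int) (hpre : Pre_bf2 grid K) :
    bf2 grid K =
      (let R := rowsA K ((K + 1).toNat) ((grid.headD []).length) none grid
       let cell := (R.getD (grid.length - 1) []).getD ((grid.headD []).length - 1) dfltA
       ((cell.1).getD 0,
        (List.range ((K + 1).toNat)).foldl (fun s d => s + cell.2.getD d 0) 0)) := by
  obtain ⟨hg, hr, hlenrows, hK⟩ := hpre
  have hM : 0 < grid.length := List.length_pos_iff.mpr hg
  have hN : 0 < (grid.headD []).length := List.length_pos_iff.mpr hr
  have hrows : ∀ r, r < grid.length →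
      (((rowsA K ((K + 1).toNat) ((grid.headD []).length) none grid).getD r []).length)
        = (grid.headD []).length := by
    intro r hrj
    rw [rowsA_getD K ((K + 1).toNat) ((grid.headD []).length) grid none r hrj, cellsA_length]
  have hRAlen : (rowsA K ((K + 1).toNat) ((grid.headD []).length) none grid).length
      = grid.length := rowsA_length K ((K + 1).toNat) ((grid.headD []).length) none grid
  have hrow0 : (rowsA K ((K + 1).toNat) ((grid.headD []).length) none grid).getD 0 []
      = cellsA K ((K + 1).toNat) none (grid.getD 0 []) ((grid.headD []).length) := by
    rw [rowsA_getD K ((K + 1).toNat) ((grid.headD []).length) grid none 0 hM]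
    simp
  have hcell0 : ((rowsA K ((K + 1).toNat) ((grid.headD []).length) none grid).getD 0 []).getD 0
      dfltA = cellA0 ((K + 1).toNat) ((grid.getD 0 []).getD 0 0) := by
    rw [hrow0, cellsA_getD_none_zero K ((K + 1).toNat) (grid.getD 0 [])
      ((grid.headD []).length) hN]
  have hv1 : (some ((grid.headD []).headD 0) : Option Int)
      = Prod.fst (((rowsA K ((K + 1).toNat) ((grid.headD []).length) none grid).getD 0
          []).getD 0 dfltA) := by
    conv_lhs => rw [headD_eq_getD, headD_eq_getD]
    rw [hcell0]
    rfl
  have hv2 : ((List.replicate ((K + 1).toNat) (0 : Int)).set 0 1)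
      = Prod.snd (((rowsA K ((K + 1).toNat) ((grid.headD []).length) none grid).getD 0
          []).getD 0 dfltA) := by
    rw [hcell0]
    rfl
  simp only [bf2]
  rw [hv1, hv2,
    init_tab Prod.fst none (rowsA K ((K + 1).toNat) ((grid.headD []).length) none grid)
      grid.length ((grid.headD []).length) hM hN (hrows 0 hM),
    init_tab Prod.snd (List.replicate ((K + 1).toNat) (0 : Int))
      (rowsA K ((K + 1).toNat) ((grid.headD []).length) none grid)
      grid.length ((grid.headD []).length) hM hN (hrows 0 hM),
    outerA_fold grid K ((K + 1).toNat)
      (rowsA K ((K + 1).toNat) ((grid.headD []).length) none grid)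
      grid.length ((grid.headD []).length) rfl rfl hrows hN grid.length hM le_rfl]
  rw [doneTab_get Prod.fst none (rowsA K ((K + 1).toNat) ((grid.headD []).length) none grid)
      grid.length ((grid.headD []).length) hRAlen none rfl,
    doneTab_get Prod.snd (List.replicate ((K + 1).toNat) (0 : Int))
      (rowsA K ((K + 1).toNat) ((grid.headD []).length) none grid)
      grid.length ((grid.headD []).length) hRAlen [] rfl]

theorem bf2_alt_eq_rowsB (grid : List (List Int)) (K : Int) (hpre : Pre_bf2 grid K) :
    bf2_alt grid K =
      (let R := rowsB K ((grid.headD []).length) none grid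
       let last := (R.getD (grid.length - 1) []).getD ((grid.headD []).length - 1) []
       ((last.headD (0, 0)).1, (last.map Prod.snd).sum)) := by
  cases grid with
  | nil => exact absurd rfl hpre.1
  | cons v0 rest =>
    simp only [bf2_alt]
    rw [PySem.List.enumerate_cons, List.foldl_cons]
    have h0 : pvRowB K ((v0 :: rest).headD []).length [] (0, v0)
        = cellsB K none v0 ((v0 :: rest).headD []).length := by
      have h := rowB_eq_cellsB K [] 0 v0 (Or.inl rfl) ((v0 :: rest).headD []).length
      rw [if_pos rfl] at h
      exact h
    rw [h0, outerB_eq K ((v0 :: rest).headD []).length rest (0 + 1) (by omega) _]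
    rw [show rowsB K ((v0 :: rest).headD []).length none (v0 :: rest)
        = cellsB K none v0 ((v0 :: rest).headD []).length ::
          rowsB K ((v0 :: rest).headD []).length
            (some (cellsB K none v0 ((v0 :: rest).headD []).length)) rest by
      simp only [rowsB]]
    cases rest with
    | nil => rfl
    | cons v2 r2 =>
      have hlen : (rowsB K ((v0 :: v2 :: r2).headD []).length
          (some (cellsB K none v0 ((v0 :: v2 :: r2).headD []).length)) (v2 :: r2)).length
          = (v2 :: r2).length := rowsB_length _ _ _ _
      rw [show (v0 :: v2 :: r2).length - 1 = ((v2 :: r2).length - 1) + 1 by simp,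
        List.getD_cons_succ,
        List.getD_eq_getElem
          (rowsB K ((v0 :: v2 :: r2).headD []).length
            (some (cellsB K none v0 ((v0 :: v2 :: r2).headD []).length)) (v2 :: r2))
          (cellsB K none v0 ((v0 :: v2 :: r2).headD []).length) (by rw [hlen]; simp),
        List.getD_eq_getElem
          (rowsB K ((v0 :: v2 :: r2).headD []).length
            (some (cellsB K none v0 ((v0 :: v2 :: r2).headD []).length)) (v2 :: r2))
          ([]) (by rw [hlen]; simp)]

-- ================= output extraction =================

theorem out_of_inv (K : Int) (hK : 0 ≤ K) (Kn : Nat) (hKn : (Kn : Int) = K + 1)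
    (cell : CellA) (l : RepL) (h : InvCell K Kn cell l) :
    ((cell.1).getD 0, (List.range Kn).foldl (fun s e => s + cell.2.getD e 0) 0)
      = ((l.headD (0, 0)).1, (l.map Prod.snd).sum) := by
  obtain ⟨m, c, rfl, hlen, hpt, hkey, hd, hm⟩ := h
  have hhead : (l.headD (0, 0)).1 = m :=
    head_eq_of_max l hd m hm (fun p hp => (hkey p hp).2.1)
  refine Prod.ext (by simpa using hhead.symm) ?_
  show (List.range Kn).foldl (fun s e => s + c.getD e 0) 0 = (l.map Prod.snd).sum
  rw [PySem.List.foldl_add (List.range Kn) (fun e => c.getD e 0) 0, zero_add]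
  rw [List.map_congr_left (fun e he => hpt e (List.mem_range.mp he))]
  have hmapmap : (List.range Kn).map (fun (e : Nat) => lkL l (m - (e : Int)))
      = ((List.range Kn).map (fun (e : Nat) => (m - (e : Int)))).map (fun k => lkL l k) := by
    rw [List.map_map]; rfl
  rw [hmapmap]
  have hnodup : (l.map Prod.fst).Nodup := desc_keys_nodup l hd
  rw [show (l.map Prod.snd).sum = ((l.map Prod.fst).map (fun k => lkL l k)).sum from by
    rw [map_keys_lk l hd]]
  have hLnd : ((List.range Kn).map (fun (e : Nat) => (m - (e : Int)))).Nodup :=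
    List.Nodup.map (fun a b hab => by omega) (List.nodup_range)
  have hmap_on_fin : ∀ (L : List Int), L.Nodup →
      (L.map (fun k => lkL l k)).sum = ∑ k ∈ L.toFinset, lkL l k := by
    intro L hL
    rw [← List.sum_toFinset _ hL]
  rw [hmap_on_fin _ hLnd, hmap_on_fin _ hnodup]
  refine (Finset.sum_subset ?_ ?_).symm
  · intro k hk
    rw [List.mem_toFinset] at hk ⊢
    rcases List.mem_map.mp hk with ⟨p, hp, rfl⟩
    have hb := hkey p hp
    exact List.mem_map.mpr ⟨(m - p.1).toNat, List.mem_range.mpr (by omega), by omega⟩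
  · intro k _ hk
    rw [List.mem_toFinset] at hk
    refine lkL_eq_zero_of_not_mem l k (fun p hp hpk => hk ?_)
    exact List.mem_map.mpr ⟨p, hp, hpk⟩

-- ===== VERDICT (by name: the statement is the Claim_ definition above) =====
theorem bf2_spec : Claim_equal_bf2 := by
  intro grid K hdom hpre
  unfold Spec_bf2
  obtain ⟨hg, hr, hlen, hK⟩ := hpre
  have hKn : (((K + 1).toNat : Nat) : Int) = K + 1 := by omega
  rw [bf2_eq_rowsA grid K ⟨hg, hr, hlen, hK⟩, bf2_alt_eq_rowsB grid K ⟨hg, hr, hlen, hK⟩]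
  have h := rows_inv K hK ((K + 1).toNat) hKn ((grid.headD []).length) grid none none trivial
  have hM : 0 < grid.length := List.length_pos_iff.mpr hg
  have h2 := (h.2 (grid.length - 1) (by omega)).2
  have hlenrow := (h.2 (grid.length - 1) (by omega)).1
  have hN : 0 < (grid.headD []).length := by
    cases grid with
    | nil => exact absurd rfl hg
    | cons a t => exact List.length_pos_iff.mpr hr
  have hcell := h2.2 ((grid.headD []).length - 1) (by rw [hlenrow]; omega)
  exact out_of_inv K hK ((K + 1).toNat) hKn _ _ hcell
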